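-- pv_equiv track=rewrite | github.com/AustinBao/LeetCode | Contest/CCC/2018/AreWeThereYet.py | thereyet
-- ===== SOURCE A (Python) =====
-- def thereyet(distances):
--     c = [0]
--     for i in range(0, 4):
--         c.append(c[i] + distances[i])
--
--     r = []
--     for i in range(0, 5):
--         line = [] # create a nested list so its easier to view
--         for j in range(0, 5):
--             distance = c[j] - c[i] # Check out python for an absolute function
--             if distance < 0:
--                 distance *= -1
--             line.append(distance)
--         r.append(line)
--     return r
-- ===== SOURCE B (Python) =====
-- def thereyet(distances):
--     r = []
--     for i in range(5):
--         # distances to stops before i, accumulated outward then reversed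
--         left = []
--         acc = 0
--         for j in range(i - 1, -1, -1):
--             acc += distances[j]
--             left.append(abs(acc))
--         row = left[::-1] + [0]
--         # distances to stops after i, accumulated outward
--         acc = 0
--         for j in range(i, 4):
--             acc += distances[j]
--             row.append(abs(acc))
--         r.append(row)
--     return r
-- ===== Notes on version B (the rewrite author's own statement) =====
-- stated objective: alternative
-- what changed: B drops A's prefix-sum list c entirely and builds each row directly by two outward running-sum accumulations (backward for stops before i, forward for stops after i), taking abs of each segment sum instead of abs of a prefix difference.
import Mathlib
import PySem

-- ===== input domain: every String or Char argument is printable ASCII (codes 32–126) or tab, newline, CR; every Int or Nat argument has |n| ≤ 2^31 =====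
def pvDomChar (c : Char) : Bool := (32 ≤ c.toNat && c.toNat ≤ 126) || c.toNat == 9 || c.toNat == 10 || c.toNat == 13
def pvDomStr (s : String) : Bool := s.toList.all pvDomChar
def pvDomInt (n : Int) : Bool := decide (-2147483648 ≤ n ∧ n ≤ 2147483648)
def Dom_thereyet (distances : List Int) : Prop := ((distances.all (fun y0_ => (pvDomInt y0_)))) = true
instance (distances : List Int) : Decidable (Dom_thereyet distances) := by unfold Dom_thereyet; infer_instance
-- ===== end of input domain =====

-- B builds each row by two outward running sums instead of A's prefix-sum list; alternative decomposition, same cost.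
-- ===== PORT A =====
def thereyet (distances : List Int) : List (List Int) :=
  let c := (PySem.List.pyRange 0 4 1).foldl
    (fun c i => c ++ [PySem.List.pyGetD c i 0 + PySem.List.pyGetD distances i 0]) [0]
  (PySem.List.pyRange 0 5 1).foldl (fun r i =>
    let line := (PySem.List.pyRange 0 5 1).foldl (fun line j =>
      let distance := PySem.List.pyGetD c j 0 - PySem.List.pyGetD c i 0
      let distance := if distance < 0 then distance * (-1) else distance
      line ++ [distance]) []
    r ++ [line]) []

-- ===== PORT B =====
def thereyet_alt (distances : List Int) : List (List Int) :=
  (PySem.List.pyRange 0 5 1).foldl (fun r i =>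
    let p := (PySem.List.pyRange (i - 1) (-1) (-1)).foldl
      (fun (p : List Int × Int) j =>
        let acc := p.2 + PySem.List.pyGetD distances j 0
        (p.1 ++ [|acc|], acc)) ([], 0)
    let row := (PySem.List.slice? p.1 none none (-1)).getD [] ++ [0]
    let q := (PySem.List.pyRange i 4 1).foldl
      (fun (q : List Int × Int) j =>
        let acc := q.2 + PySem.List.pyGetD distances j 0
        (q.1 ++ [|acc|], acc)) (row, 0)
    r ++ [q.1]) []

-- ===== PRECONDITION & SPEC =====
-- Python A raises IndexError (distances[i] for i in 0..3) when fewer than 4 distances are given.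
def Pre_thereyet (distances : List Int) : Prop := 4 ≤ distances.length
instance (distances : List Int) : Decidable (Pre_thereyet distances) := by unfold Pre_thereyet; infer_instance
def pvWitness_thereyet : List Int := [3, 10, 2, 4]

def Spec_thereyet (distances : List Int) (out : List (List Int)) : Prop := out = thereyet_alt distances
instance (distances : List Int) (out : List (List Int)) : Decidable (Spec_thereyet distances out) := by unfold Spec_thereyet; infer_instance

-- ===== CLAIM (what is proved, stated in full; the proofs are below) =====
def Claim_equal_thereyet : Prop := ∀ (distances : List Int), Dom_thereyet distances → Pre_thereyet distances → Spec_thereyet distances (thereyet distances)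

-- ===== LEMMAS AND PROOFS =====

theorem abs_if_eq (x : Int) : (if x < 0 then x * (-1) else x) = |x| := by
  split
  · rw [abs_of_neg (by assumption)]; ring
  · rw [abs_of_nonneg (le_of_not_gt (by assumption))]

-- ===== VERDICT (by name: the statement is the Claim_ definition above) =====
theorem thereyet_spec : Claim_equal_thereyet := by
  intro distances _ hpre
  unfold Pre_thereyet at hpre
  unfold Spec_thereyet
  match distances, hpre with
  | d0 :: d1 :: d2 :: d3 :: rest, _ =>
    have hr4 : PySem.List.pyRange 0 4 1 = [0,1,2,3] := by decide
    have hr5 : PySem.List.pyRange 0 5 1 = [0,1,2,3,4] := by decide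
    have hrB0 : PySem.List.pyRange (0-1) (-1) (-1) = [] := by decide
    have hrB1 : PySem.List.pyRange (1-1) (-1) (-1) = [0] := by decide
    have hrB2 : PySem.List.pyRange (2-1) (-1) (-1) = [1,0] := by decide
    have hrB3 : PySem.List.pyRange (3-1) (-1) (-1) = [2,1,0] := by decide
    have hrB4 : PySem.List.pyRange (4-1) (-1) (-1) = [3,2,1,0] := by decide
    have hrF1 : PySem.List.pyRange 1 4 1 = [1,2,3] := by decide
    have hrF2 : PySem.List.pyRange 2 4 1 = [2,3] := by decide
    have hrF3 : PySem.List.pyRange 3 4 1 = [3] := by decide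
    have hrF4 : PySem.List.pyRange 4 4 1 = [] := by decide
    simp only [thereyet, thereyet_alt, hr4, hr5, hrB0, hrB1, hrB2, hrB3, hrB4,
      hrF1, hrF2, hrF3, hrF4, List.foldl, PySem.List.pyGetD_ofNat', abs_if_eq]
    simp [PySem.List.slice?_none_none_neg_one, List.getD]
    simp only [Int.abs_eq_natAbs]
    omega
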